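-- pv_equiv track=rewrite | github.com/essenceD/Python_algorythmes | Lesson_7(Sorting algorithms)/task_3.py | get_med
-- ===== SOURCE A (Python) =====
-- def get_med(array):
--     min_val = array[0]
--     max_val = array[0]
--     for i in array:
--         if i < min_val:
--             min_val = i
--         if i > max_val:
--             max_val = i
--     for i in array:
--         min_counter = 0
--         max_counter = 0
--         median = i
--         for j in array:
--             if j < median:
--                 min_counter += 1
--             if j > median:
--                 max_counter += 1
--         if max_counter == min_counter:
--             return median
-- ===== SOURCE B (Python) =====
-- def get_med(array):
--     # sort once, then O(1) lookups: first-occurrence index in the sorted copy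
--     # = count of strictly smaller elements; a frequency table gives the rest.
--     s = sorted(array)
--     n = len(s)
--     counts = {}
--     for x in array:
--         counts[x] = counts.get(x, 0) + 1
--     first = {}
--     for i, x in enumerate(s):
--         if x not in first:
--             first[x] = i
--     for v in array:
--         f = first[v]
--         if f == n - f - counts[v]:
--             return v
--     return None
-- ===== Notes on version B (the rewrite author's own statement) =====
-- stated objective: faster
-- what changed: Replaces A's per-element rescan of the whole list (counting smaller/greater for every candidate) by one sort plus a first-occurrence-index table and a frequency table, then a single scan in original order with O(1) lookups.
import Mathlib
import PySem

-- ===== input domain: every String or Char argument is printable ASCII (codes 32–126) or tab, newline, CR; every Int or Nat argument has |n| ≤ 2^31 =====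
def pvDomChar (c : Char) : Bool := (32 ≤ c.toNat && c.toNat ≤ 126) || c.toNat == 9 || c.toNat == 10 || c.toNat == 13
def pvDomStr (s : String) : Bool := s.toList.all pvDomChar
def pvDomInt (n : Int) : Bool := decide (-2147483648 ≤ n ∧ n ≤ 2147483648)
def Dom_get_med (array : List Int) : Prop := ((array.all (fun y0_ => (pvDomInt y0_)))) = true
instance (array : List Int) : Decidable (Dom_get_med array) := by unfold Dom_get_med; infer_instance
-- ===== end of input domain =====

-- B replaces A's quadratic rescan (for each element, count smaller/greater over the
-- whole list) by one sort plus first-index and frequency tables, then a single scan.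

-- ===== PORT A =====
-- inner 'for j in array' loop: two counters
def pvAcount (arr : List Int) (median : Int) : Int × Int :=
  arr.foldl (fun (c : Int × Int) j =>
    (if j < median then c.1 + 1 else c.1, if j > median then c.2 + 1 else c.2)) (0, 0)

-- outer 'for i in array' loop with early return
def pvAscan (arr : List Int) : List Int → Option Int
  | [] => none
  | i :: rest =>
    let c := pvAcount arr i
    if c.2 = c.1 then some i else pvAscan arr rest

def get_med (array : List Int) : Option Int :=
  match array with
  | [] => none  -- Python raises IndexError on array[0] here; excluded by Pre_get_med
  | a0 :: _ =>
    let _mm := array.foldl (fun (m : Int × Int) i =>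
      (if i < m.1 then i else m.1, if i > m.2 then i else m.2)) (a0, a0)  -- min_val/max_val (unused by A)
    pvAscan array array

-- ===== PORT B =====
-- counts[x] = counts.get(x, 0) + 1
def pvBcounts (array : List Int) : PySem.Dict Int Int :=
  array.foldl (fun d x => d.insert x (d.getD x 0 + 1)) PySem.Dict.empty

-- for i, x in enumerate(s): if x not in first: first[x] = i
def pvBfirst : List Int → Int → PySem.Dict Int Int → PySem.Dict Int Int
  | [], _, d => d
  | x :: t, i, d => pvBfirst t (i + 1) (if d.contains x then d else d.insert x i)

-- final 'for v in array' loop; v is always a key of both dicts (Python would raise KeyError otherwise)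
def pvBscan (first counts : PySem.Dict Int Int) (n : Int) : List Int → Option Int
  | [] => none
  | v :: rest =>
    let f := (first.get? v).getD 0
    if f = n - f - ((counts.get? v).getD 0) then some v else pvBscan first counts n rest

def get_med_alt (array : List Int) : Option Int :=
  let s := PySem.List.sorted array (fun x => x) false
  let n : Int := s.length
  pvBscan (pvBfirst s 0 PySem.Dict.empty) (pvBcounts array) n array

-- ===== PRECONDITION & SPEC =====
-- Pre_ excludes only the empty list, on which A raises IndexError (array[0]).
def Pre_get_med (array : List Int) : Prop := array ≠ []
instance (array : List Int) : Decidable (Pre_get_med array) := by unfold Pre_get_med; infer_instance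
def pvWitness_get_med : List Int := [3, 1, 2]

def Spec_get_med (array : List Int) (out : Option Int) : Prop := out = get_med_alt array
instance (array : List Int) (out : Option Int) : Decidable (Spec_get_med array out) := by unfold Spec_get_med; infer_instance

-- ===== CLAIM (what is proved, stated in full; the proofs are below) =====
def Claim_equal_get_med : Prop := ∀ (array : List Int), Dom_get_med array → Pre_get_med array → Spec_get_med array (get_med array)

-- ===== LEMMAS AND PROOFS =====

-- A's inner loop computes the two strict counts
theorem pvAcount_eq (arr : List Int) (v : Int) :
    pvAcount arr v = ((arr.countP (fun j => decide (j < v)) : Int),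
                      (arr.countP (fun j => decide (v < j)) : Int)) := by
  unfold pvAcount
  rw [PySem.List.foldl_prod_mk (f := fun c j => if j < v then c + 1 else c)
        (g := fun c j => if j > v then c + 1 else c)]
  rw [PySem.List.foldl_ite_add_one (p := fun j => j < v),
      PySem.List.foldl_ite_add_one (p := fun j => j > v)]
  simp [gt_iff_lt]

-- A's outer loop is find? of the count-equality predicate
theorem pvAscan_eq_find? (arr : List Int) (l : List Int) :
    pvAscan arr l = l.find? (fun v =>
      decide ((arr.countP (fun j => decide (v < j)) : Int) = (arr.countP (fun j => decide (j < v)) : Int))) := by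
  induction l with
  | nil => rfl
  | cons v rest ih =>
    simp only [pvAscan, pvAcount_eq, List.find?_cons]
    by_cases h : (arr.countP (fun j => decide (v < j)) : Int) = (arr.countP (fun j => decide (j < v)) : Int)
    · simp [h]
    · simp [h, ih]

-- B's scan loop is find? of its lookup predicate
theorem pvBscan_eq_find? (first counts : PySem.Dict Int Int) (n : Int) (l : List Int) :
    pvBscan first counts n l = l.find? (fun v =>
      decide ((first.get? v).getD 0 = n - (first.get? v).getD 0 - (counts.get? v).getD 0)) := by
  induction l with
  | nil => rfl
  | cons v rest ih =>
    by_cases h : (first.get? v).getD 0 = n - (first.get? v).getD 0 - (counts.get? v).getD 0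
    · rw [List.find?_cons_of_pos (by simpa using h)]
      simp only [pvBscan, if_pos h]
    · rw [List.find?_cons_of_neg (by simpa using h)]
      simp only [pvBscan, if_neg h]
      exact ih

-- once a key is present, pvBfirst never changes it
theorem pvBfirst_preserve (t : List Int) (i : Int) (d : PySem.Dict Int Int) (v a : Int)
    (h : d.get? v = some a) : (pvBfirst t i d).get? v = some a := by
  induction t generalizing i d with
  | nil => exact h
  | cons x r ih =>
    simp only [pvBfirst]
    apply ih
    by_cases hxv : x = v
    · have hc : d.contains x = true := by
        rw [hxv, PySem.Dict.contains_eq_isSome_get?, h]; rfl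
      rw [if_pos hc]; exact h
    · by_cases hc : d.contains x
      · rw [if_pos hc]; exact h
      · rw [if_neg hc, PySem.Dict.get?_insert_of_ne d i (Ne.symm hxv)]; exact h

-- on a sorted list, the recorded first index of v is i + (number of elements < v)
theorem pvBfirst_get? (t : List Int) (i : Int) (d : PySem.Dict Int Int) (v : Int)
    (hv : v ∈ t) (hd : d.contains v = false) (hs : t.Pairwise (· ≤ ·)) :
    (pvBfirst t i d).get? v = some (i + (t.countP (fun j => decide (j < v)) : Int)) := by
  induction t generalizing i d with
  | nil => cases hv
  | cons x r ih =>
    have hx : ∀ y ∈ r, x ≤ y := (List.pairwise_cons.mp hs).1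
    have hr : r.Pairwise (· ≤ ·) := (List.pairwise_cons.mp hs).2
    by_cases hvx : v = x
    · have hcnt : (x :: r).countP (fun j => decide (j < v)) = 0 := by
        rw [List.countP_eq_zero]
        intro j hj
        simp only [decide_eq_true_eq, not_lt]
        rcases List.mem_cons.mp hj with h | h
        · omega
        · have := hx j h; omega
      have hdx : d.contains x = false := hvx ▸ hd
      have hins : (d.insert x i).get? v = some i := by
        rw [hvx]; exact PySem.Dict.get?_insert_self d x i
      have hfin := pvBfirst_preserve r (i + 1) (d.insert x i) v i hins
      simp only [pvBfirst, hdx, Bool.false_eq_true, if_false]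
      rw [hfin, hcnt]
      simp
    · have hvr : v ∈ r := by
        rcases List.mem_cons.mp hv with h | h
        · exact absurd h hvx
        · exact h
      have hxv : x < v := lt_of_le_of_ne (hx v hvr) (fun h => hvx h.symm)
      have hd' : (if d.contains x then d else d.insert x i).contains v = false := by
        by_cases hc : d.contains x
        · simpa [hc] using hd
        · simp [hc, PySem.Dict.contains_insert, hd, hvx]
      have := ih (i + 1) _ hvr hd' hr
      simp only [pvBfirst]
      rw [this]
      have hcnt : (x :: r).countP (fun j => decide (j < v))
          = r.countP (fun j => decide (j < v)) + 1 := by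
        simp [hxv]
      rw [hcnt]
      push_cast
      ring_nf

-- the three-way partition of a list by comparison with v
theorem pvTri (l : List Int) (v : Int) :
    l.countP (fun j => decide (j < v)) + l.count v + l.countP (fun j => decide (v < j)) = l.length := by
  induction l with
  | nil => rfl
  | cons x r ih =>
    rcases lt_trichotomy x v with h | h | h
    · have h2 : x ≠ v := ne_of_lt h
      simp [h, not_lt.mpr h.le, h2]
      omega
    · simp [h]
      omega
    · have h2 : x ≠ v := ne_of_gt h
      simp [not_lt.mpr h.le, h, h2]
      omega

-- counts.get(v) is the multiplicity of v in array
theorem pvBcounts_getD (array : List Int) (v : Int) :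
    ((pvBcounts array).get? v).getD 0 = (array.count v : Int) := by
  rw [← PySem.Dict.getD_eq_get?_getD]
  unfold pvBcounts
  rw [PySem.Dict.getD_foldl_insert_add_one]
  simp [PySem.Dict.getD_empty]

-- find? with pointwise-equal predicates
theorem pvFind?_congr {α : Type} (l : List α) (p q : α → Bool)
    (h : ∀ x ∈ l, p x = q x) : l.find? p = l.find? q := by
  induction l with
  | nil => rfl
  | cons x r ih =>
    simp only [List.find?_cons, h x (List.mem_cons_self)]
    cases hq : q x
    · simp [ih (fun y hy => h y (List.mem_cons_of_mem x hy))]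
    · rfl

-- ===== VERDICT (by name: the statement is the Claim_ definition above) =====
theorem get_med_spec : Claim_equal_get_med := by
  intro array _hdom hpre
  unfold Spec_get_med
  match harr : array with
  | [] => exact absurd rfl hpre
  | a0 :: tl =>
    set arr := a0 :: tl with harr'
    show pvAscan arr arr = get_med_alt arr
    unfold get_med_alt
    rw [pvAscan_eq_find?, pvBscan_eq_find?]
    apply pvFind?_congr
    intro v hv
    have hs : v ∈ PySem.List.sorted arr (fun x => x) false := by
      rw [PySem.List.mem_sorted]; exact hv
    have hsort : (PySem.List.sorted arr (fun x => x) false).Pairwise (· ≤ ·) := by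
      simpa using PySem.List.sorted_pairwise arr (fun x => x)
    have hfirst := pvBfirst_get? _ 0 PySem.Dict.empty v hs
      (PySem.Dict.contains_empty v) hsort
    rw [hfirst]
    have hperm : (PySem.List.sorted arr (fun x => x) false).Perm arr :=
      PySem.List.sorted_perm arr (fun x => x) false
    have hlen : (PySem.List.sorted arr (fun x => x) false).length = arr.length :=
      hperm.length_eq
    have hclt : (PySem.List.sorted arr (fun x => x) false).countP (fun j => decide (j < v))
        = arr.countP (fun j => decide (j < v)) := hperm.countP_eq _
    have htri := pvTri arr v
    rw [pvBcounts_getD]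
    simp only [Option.getD_some, hclt, hlen]
    have hiff : ((arr.countP (fun j => decide (v < j)) : Int) = (arr.countP (fun j => decide (j < v)) : Int))
        ↔ (0 + (arr.countP (fun j => decide (j < v)) : Int)
            = (arr.length : Int) - (0 + (arr.countP (fun j => decide (j < v)) : Int)) - (arr.count v : Int)) := by
      constructor
      · intro h; omega
      · intro h; omega
    by_cases h : (arr.countP (fun j => decide (v < j)) : Int) = (arr.countP (fun j => decide (j < v)) : Int)
    · rw [decide_eq_true h, decide_eq_true (hiff.mp h)]
    · rw [decide_eq_false h, decide_eq_false (fun hc => h (hiff.mpr hc))]
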